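-- pv_equiv track=rewrite | github.com/saadxxx847-ai/Graduation-Project | utils/data_loader.py | resolve_temperature_column_name
-- ===== SOURCE A (Python) =====
-- def resolve_temperature_column_name(feature_names: list[str]) -> str:
--     """在 weather表头中定位气温列名（与 main 中逻辑一致）。"""
--     for key in ("T (degC)", "T(degC)", "temp", "temperature"):
--         for name in feature_names:
--             if name.strip().lower() == key.lower():
--                 return name
--     for name in feature_names:
--         n = name.lower()
--         if "degc" in n and "tlog" not in n and "tpot" not in n and n.strip().startswith("t"):
--             return name
--     raise ValueError(
--         f"未找到气温列（期望如 T (degC)）。当前列: {feature_names[:15]}..."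
--     )
-- ===== SOURCE B (Python) =====
-- _PRIORITY = ("t (degc)", "t(degc)", "temp", "temperature")
--
--
-- def _rank(name: str):
--     """Score a column name: 0-3 for an exact priority match, 4 for the degc fallback, None otherwise."""
--     n = name.strip().lower()
--     if n == "t (degc)":
--         return 0
--     if n == "t(degc)":
--         return 1
--     if n == "temp":
--         return 2
--     if n == "temperature":
--         return 3
--     nl = name.lower()
--     if "degc" in nl and "tlog" not in nl and "tpot" not in nl and nl.strip().startswith("t"):
--         return 4
--     return None
--
--
-- def resolve_temperature_column_name(feature_names: list[str]) -> str:
--     """在 weather表头中定位气温列名（与 main 中逻辑一致）。"""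
--     best = None  # (rank, name) with the smallest rank seen so far; strict '<' keeps the earliest
--     for name in feature_names:
--         r = _rank(name)
--         if r is not None and (best is None or r < best[0]):
--             best = (r, name)
--     if best is not None:
--         return best[1]
--     raise ValueError(
--         f"未找到气温列（期望如 T (degC)）。当前列: {feature_names[:15]}..."
--     )
-- ===== Notes on version B (the rewrite author's own statement) =====
-- stated objective: alternative
-- what changed: Replaces A's staged scans (one pass over feature_names per priority key, then a separate fallback pass) with a single pass that scores every name once (rank 0-3 for a priority match, 4 for the degc fallback) and keeps a running argmin with strict comparison so the earliest name of minimal rank wins.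
import Mathlib
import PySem

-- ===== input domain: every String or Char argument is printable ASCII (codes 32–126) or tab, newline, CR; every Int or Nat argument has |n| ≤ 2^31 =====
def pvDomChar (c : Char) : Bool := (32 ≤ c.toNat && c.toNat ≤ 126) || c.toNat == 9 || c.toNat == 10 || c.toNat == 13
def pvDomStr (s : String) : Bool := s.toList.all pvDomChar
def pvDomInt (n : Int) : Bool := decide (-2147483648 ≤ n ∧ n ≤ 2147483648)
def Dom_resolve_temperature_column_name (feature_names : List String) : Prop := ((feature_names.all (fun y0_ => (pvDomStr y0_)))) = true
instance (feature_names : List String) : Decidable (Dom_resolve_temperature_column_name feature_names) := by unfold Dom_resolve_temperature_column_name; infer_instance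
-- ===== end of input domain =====

set_option maxHeartbeats 1000000


-- B replaces A's staged scans (one pass per priority key, then a fallback pass) with a single
-- pass that scores each name once and keeps a running argmin (objective: alternative).

-- shared helpers (the normalization and the fallback test both Pythons use verbatim)
def pvNorm (s : String) : String := PySem.Str.lower (PySem.Str.strip s)

def pvKeys : List String := ["T (degC)", "T(degC)", "temp", "temperature"]

def pvFallbackOk (name : String) : Bool :=
  let n := PySem.Str.lower name
  PySem.Str.isIn "degc" n && !(PySem.Str.isIn "tlog" n) && !(PySem.Str.isIn "tpot" n)
    && PySem.Str.startswith (PySem.Str.strip n) "t"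

-- ===== PORT A =====
-- outer loop over the priority keys, each rescanning feature_names; final raise excluded by Pre_
def resolve_temperature_column_name (feature_names : List String) : String :=
  match pvKeys.findSome? (fun key => feature_names.find? (fun name => pvNorm name == PySem.Str.lower key)) with
  | some name => name
  | none =>
    match feature_names.find? pvFallbackOk with
    | some name => name
    | none => ""  -- Python raises ValueError here; excluded by Pre_

-- ===== PORT B =====
-- _rank from Source B: 0-3 for a priority match, 4 for the degc fallback, none otherwise
def pvRank (name : String) : Option Nat :=
  if pvNorm name == "t (degc)" then some 0
  else if pvNorm name == "t(degc)" then some 1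
  else if pvNorm name == "temp" then some 2
  else if pvNorm name == "temperature" then some 3
  else if pvFallbackOk name then some 4
  else none

-- the loop body of Source B: update best if the new rank is strictly smaller
def pvStep (acc : Option (Nat × String)) (name : String) : Option (Nat × String) :=
  match pvRank name with
  | none => acc
  | some r =>
    match acc with
    | none => some (r, name)
    | some (br, bn) => if r < br then some (r, name) else some (br, bn)

def resolve_temperature_column_name_alt (feature_names : List String) : String :=
  match feature_names.foldl pvStep none with
  | some (_, nm) => nm
  | none => ""  -- Python raises ValueError here; excluded by Pre_

-- ===== PRECONDITION & SPEC =====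
-- Pre_ excludes exactly the inputs on which Python A (and B) raise ValueError: no name matches
-- a priority key after strip/lower and no name satisfies the degc fallback test.
def Pre_resolve_temperature_column_name (feature_names : List String) : Prop :=
  (pvKeys.any (fun key => feature_names.any (fun name => pvNorm name == PySem.Str.lower key))
    || feature_names.any pvFallbackOk) = true
instance (feature_names : List String) : Decidable (Pre_resolve_temperature_column_name feature_names) := by
  unfold Pre_resolve_temperature_column_name; infer_instance

def pvWitness_resolve_temperature_column_name : List String := ["T (degC)"]

def Spec_resolve_temperature_column_name (feature_names : List String) (out : String) : Prop := out = resolve_temperature_column_name_alt feature_names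
instance (feature_names : List String) (out : String) : Decidable (Spec_resolve_temperature_column_name feature_names out) := by unfold Spec_resolve_temperature_column_name; infer_instance

-- ===== CLAIM (what is proved, stated in full; the proofs are below) =====
def Claim_equal_resolve_temperature_column_name : Prop := ∀ (feature_names : List String), Dom_resolve_temperature_column_name feature_names → Pre_resolve_temperature_column_name feature_names → Spec_resolve_temperature_column_name feature_names (resolve_temperature_column_name feature_names)

-- ===== LEMMAS AND PROOFS =====

-- left-biased minimum on scored candidates
def pvMerge (x y : Option (Nat × String)) : Option (Nat × String) :=
  match x, y with
  | x, none => x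
  | none, some b => some b
  | some a, some b => if b.1 < a.1 then some b else some a

def pvRP (n : String) : Option (Nat × String) := (pvRank n).map (fun r => (r, n))

def pvBest (fns : List String) : Option (Nat × String) :=
  fns.foldr (fun n b => pvMerge (pvRP n) b) none

def pvFirstAt (j : Nat) (fns : List String) : Option String :=
  fns.find? (fun n => pvRank n == some j)

def pvChain (fns : List String) : Option (Nat × String) :=
  match pvFirstAt 0 fns with
  | some n => some (0, n)
  | none => match pvFirstAt 1 fns with
    | some n => some (1, n)
    | none => match pvFirstAt 2 fns with
      | some n => some (2, n)
      | none => match pvFirstAt 3 fns with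
        | some n => some (3, n)
        | none => match pvFirstAt 4 fns with
          | some n => some (4, n)
          | none => none

theorem pvMerge_none_left (y : Option (Nat × String)) : pvMerge none y = y := by
  cases y <;> rfl

theorem pvStep_eq (acc : Option (Nat × String)) (n : String) :
    pvStep acc n = pvMerge acc (pvRP n) := by
  unfold pvStep pvRP pvMerge
  cases pvRank n <;> cases acc <;> simp

theorem pvMerge_assoc (x y z : Option (Nat × String)) :
    pvMerge (pvMerge x y) z = pvMerge x (pvMerge y z) := by
  rcases x with _ | ⟨a, an⟩ <;> rcases y with _ | ⟨b, bn⟩ <;> rcases z with _ | ⟨c, cn⟩ <;>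
    first
      | rfl
      | exact (pvMerge_none_left _).symm
      | (by_cases h1 : b < a <;> by_cases h2 : c < b <;> by_cases h3 : c < a <;>
          simp [pvMerge, h1, h2, h3] <;> first | rfl | (exfalso; omega))

theorem foldl_pvStep (fns : List String) (acc : Option (Nat × String)) :
    fns.foldl pvStep acc = pvMerge acc (pvBest fns) := by
  induction fns generalizing acc with
  | nil => cases acc <;> rfl
  | cons n t ih =>
    simp only [List.foldl_cons, pvStep_eq, pvBest, List.foldr_cons]
    rw [ih, pvMerge_assoc]
    rfl

theorem pvRank_le (n : String) (r : Nat) (h : pvRank n = some r) : r ≤ 4 := by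
  unfold pvRank at h
  by_cases e0 : pvNorm n = "t (degc)" <;> by_cases e1 : pvNorm n = "t(degc)" <;>
    by_cases e2 : pvNorm n = "temp" <;> by_cases e3 : pvNorm n = "temperature" <;>
    cases hf : pvFallbackOk n <;> simp_all <;> omega

theorem pvFirstAt_cons (j : Nat) (n : String) (t : List String) :
    pvFirstAt j (n :: t) = if pvRank n == some j then some n else pvFirstAt j t := by
  unfold pvFirstAt
  rw [List.find?_cons]
  cases h : (pvRank n == some j) <;> simp [h]

theorem pvChain_cons (n : String) (t : List String) :
    pvChain (n :: t) = pvMerge (pvRP n) (pvChain t) := by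
  cases h : pvRank n with
  | none =>
    simp only [pvChain, pvFirstAt_cons, h, pvRP, Option.map_none]
    rw [pvMerge_none_left]
    simp
  | some r =>
    have hr := pvRank_le n r h
    interval_cases r <;>
      rcases h0 : pvFirstAt 0 t with _ | m0 <;>
      rcases h1 : pvFirstAt 1 t with _ | m1 <;>
      rcases h2 : pvFirstAt 2 t with _ | m2 <;>
      rcases h3 : pvFirstAt 3 t with _ | m3 <;>
      rcases h4 : pvFirstAt 4 t with _ | m4 <;>
      simp [pvChain, pvFirstAt_cons, h, h0, h1, h2, h3, h4, pvRP, pvMerge]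

theorem pvBest_eq_chain (fns : List String) : pvBest fns = pvChain fns := by
  induction fns with
  | nil => rfl
  | cons n t ih =>
    rw [pvChain_cons, ← ih]
    simp [pvBest]

-- predicate bridges: A's per-key tests coincide with rank tests
theorem pred0 (n : String) : (pvNorm n == "t (degc)") = (pvRank n == some 0) := by
  unfold pvRank
  by_cases e0 : pvNorm n = "t (degc)" <;> by_cases e1 : pvNorm n = "t(degc)" <;>
    by_cases e2 : pvNorm n = "temp" <;> by_cases e3 : pvNorm n = "temperature" <;>
    cases hf : pvFallbackOk n <;> simp_all
theorem pred1 (n : String) : (pvNorm n == "t(degc)") = (pvRank n == some 1) := by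
  unfold pvRank
  by_cases e0 : pvNorm n = "t (degc)" <;> by_cases e1 : pvNorm n = "t(degc)" <;>
    by_cases e2 : pvNorm n = "temp" <;> by_cases e3 : pvNorm n = "temperature" <;>
    cases hf : pvFallbackOk n <;> simp_all
theorem pred2 (n : String) : (pvNorm n == "temp") = (pvRank n == some 2) := by
  unfold pvRank
  by_cases e0 : pvNorm n = "t (degc)" <;> by_cases e1 : pvNorm n = "t(degc)" <;>
    by_cases e2 : pvNorm n = "temp" <;> by_cases e3 : pvNorm n = "temperature" <;>
    cases hf : pvFallbackOk n <;> simp_all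
theorem pred3 (n : String) : (pvNorm n == "temperature") = (pvRank n == some 3) := by
  unfold pvRank
  by_cases e0 : pvNorm n = "t (degc)" <;> by_cases e1 : pvNorm n = "t(degc)" <;>
    by_cases e2 : pvNorm n = "temp" <;> by_cases e3 : pvNorm n = "temperature" <;>
    cases hf : pvFallbackOk n <;> simp_all

theorem fallback_eq_rank4 (n : String)
    (h0 : ¬ (pvRank n == some 0) = true) (h1 : ¬ (pvRank n == some 1) = true)
    (h2 : ¬ (pvRank n == some 2) = true) (h3 : ¬ (pvRank n == some 3) = true) :
    pvFallbackOk n = (pvRank n == some 4) := by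
  unfold pvRank at h0 h1 h2 h3 ⊢
  by_cases e0 : pvNorm n = "t (degc)"
  · simp [e0] at h0
  by_cases e1 : pvNorm n = "t(degc)"
  · simp [e0, e1] at h1
  by_cases e2 : pvNorm n = "temp"
  · simp [e0, e1, e2] at h2
  by_cases e3 : pvNorm n = "temperature"
  · simp [e0, e1, e2, e3] at h3
  cases hf : pvFallbackOk n <;> simp [hf, e0, e1, e2, e3]

theorem find?_fallback (fns : List String)
    (g0 : pvFirstAt 0 fns = none) (g1 : pvFirstAt 1 fns = none)
    (g2 : pvFirstAt 2 fns = none) (g3 : pvFirstAt 3 fns = none) :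
    fns.find? pvFallbackOk = pvFirstAt 4 fns := by
  induction fns with
  | nil => simp [pvFirstAt]
  | cons n t ih =>
    rw [pvFirstAt_cons] at g0 g1 g2 g3 ⊢
    by_cases c0 : (pvRank n == some 0) = true
    · simp [c0] at g0
    · by_cases c1 : (pvRank n == some 1) = true
      · simp [c1] at g1
      · by_cases c2 : (pvRank n == some 2) = true
        · simp [c2] at g2
        · by_cases c3 : (pvRank n == some 3) = true
          · simp [c3] at g3
          · simp only [c0, c1, c2, c3, if_neg, Bool.false_eq_true, ite_false] at g0 g1 g2 g3
            have hfe := fallback_eq_rank4 n c0 c1 c2 c3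
            rw [List.find?_cons, hfe, ih g0 g1 g2 g3]
            cases hc : (pvRank n == some 4) <;> simp [hc]

theorem find?_ext {α : Type} (p q : α → Bool) (l : List α) (h : ∀ a, p a = q a) :
    l.find? p = l.find? q := by
  induction l with
  | nil => rfl
  | cons a t ih => rw [List.find?_cons, List.find?_cons, h, ih]

theorem lower_key0 : PySem.Str.lower "T (degC)" = "t (degc)" := by decide
theorem lower_key1 : PySem.Str.lower "T(degC)" = "t(degc)" := by decide
theorem lower_key2 : PySem.Str.lower "temp" = "temp" := by decide
theorem lower_key3 : PySem.Str.lower "temperature" = "temperature" := by decide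

theorem ports_agree (fns : List String) :
    resolve_temperature_column_name fns = resolve_temperature_column_name_alt fns := by
  have hB : resolve_temperature_column_name_alt fns =
      (match pvChain fns with
       | some (_, nm) => nm
       | none => "") := by
    unfold resolve_temperature_column_name_alt
    rw [foldl_pvStep, pvMerge_none_left, pvBest_eq_chain]
  have f0 : fns.find? (fun name => pvNorm name == PySem.Str.lower "T (degC)") = pvFirstAt 0 fns := by
    rw [lower_key0]; exact find?_ext _ _ fns pred0
  have f1 : fns.find? (fun name => pvNorm name == PySem.Str.lower "T(degC)") = pvFirstAt 1 fns := by
    rw [lower_key1]; exact find?_ext _ _ fns pred1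
  have f2 : fns.find? (fun name => pvNorm name == PySem.Str.lower "temp") = pvFirstAt 2 fns := by
    rw [lower_key2]; exact find?_ext _ _ fns pred2
  have f3 : fns.find? (fun name => pvNorm name == PySem.Str.lower "temperature") = pvFirstAt 3 fns := by
    rw [lower_key3]; exact find?_ext _ _ fns pred3
  rw [hB]
  unfold resolve_temperature_column_name pvKeys
  simp only [List.findSome?_cons, List.findSome?_nil, f0, f1, f2, f3]
  rcases h0 : pvFirstAt 0 fns with _ | m0
  · rcases h1 : pvFirstAt 1 fns with _ | m1
    · rcases h2 : pvFirstAt 2 fns with _ | m2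
      · rcases h3 : pvFirstAt 3 fns with _ | m3
        · rw [find?_fallback fns h0 h1 h2 h3]
          rcases h4 : pvFirstAt 4 fns with _ | m4 <;> simp [pvChain, h0, h1, h2, h3, h4]
        · simp [pvChain, h0, h1, h2, h3]
      · simp [pvChain, h0, h1, h2]
    · simp [pvChain, h0, h1]
  · simp [pvChain, h0]

-- ===== VERDICT (by name: the statement is the Claim_ definition above) =====
theorem resolve_temperature_column_name_spec : Claim_equal_resolve_temperature_column_name := by
  intro fns _ _
  unfold Spec_resolve_temperature_column_name
  exact ports_agree fns
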